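-- pv_equiv track=rewrite | github.com/MagolleS/EncodageD-codageADN | encode.py | tritToFinalTrit
-- ===== SOURCE A (Python) =====
-- def convert(nombre, base = 2):
--     """Fonction permettant de convertir un nombre en base 10 en une base défini.
--     Elle prend en paramètre le nombre en base 10 ainsi que la base vers laquel
--     le nombre doit etre converti, et qui par défaut est 2."""
--
--     resultat = ''
--     q = nombre // base
--     r = nombre % base
--     resultat = str(r) + resultat
--     while q != 0:
--         r = q % base
--         resultat = str(r) + resultat
--         q = q // base
--     return resultat
--
-- def tritToFinalTrit(s_trit1):
--     """Fonction qui prend en paramètre une liste contenant des str de 5 ou 6 caractere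
--     (0,1 ou 2) et la transforme de sorte qu'on puisse y connaitre sa longueur ainsi que
--     la longueur totale soit un multiple de 25. Elle renvoi également S2 (len_Trit et nb0) et S3."""
--
--     s_trit1 = "".join(s_trit1)
--     #On crée s_trit2 qui mesure 20 trit et qui donne la longueur de s1 en ternaire
--     len_Trit = convert(len(s_trit1), base=3)
--     nb0 = 20 - len(convert(len(s_trit1), base=3))
--     s_trit2 = nb0*"0" + len_Trit
--     #On crée s_trit3 en fonction de s_trit1 et s_trit2 pour que ces 3 derniers ait comme longueur un multiple de 25
--     len_trit_1_2 = len(s_trit1) + 20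
--     s_trit3 = 0
--     while (len_trit_1_2 + s_trit3)%25 != 0:
--         s_trit3+=1
--     s_trit3 = s_trit3*"0"
--     #On crée S4 : S1 + S3 + S2
--     s_trit4 = str(s_trit1) + s_trit3 + s_trit2
--     return s_trit4, len_Trit, nb0*"0", s_trit3
-- ===== SOURCE B (Python) =====
-- def tritToFinalTrit(s_trit1):
--     """Same result as A: build the ternary length header by collecting digits
--     least-significant-first in a list, and replace A's counting loop for the
--     padding with the closed form (5 - len(s)) % 25."""
--     s = "".join(s_trit1)
--     n = len(s)
--     digits = []
--     while True:
--         digits.append(str(n % 3))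
--         n //= 3
--         if n == 0:
--             break
--     len_Trit = "".join(reversed(digits))
--     zeros = "0" * (20 - len(digits))
--     pad = "0" * ((5 - len(s)) % 25)
--     return s + pad + zeros + len_Trit, len_Trit, zeros, pad
-- ===== Notes on version B (the rewrite author's own statement) =====
-- stated objective: simpler
-- what changed: B replaces A's increment-until-multiple-of-25 counting loop with the closed form (5 - len(s)) % 25, computes the ternary header once by collecting digits least-significant-first into a list (join of reversed) instead of A's two convert calls that prepend strings, and derives the zero-fill from the digit count.
import Mathlib
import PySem

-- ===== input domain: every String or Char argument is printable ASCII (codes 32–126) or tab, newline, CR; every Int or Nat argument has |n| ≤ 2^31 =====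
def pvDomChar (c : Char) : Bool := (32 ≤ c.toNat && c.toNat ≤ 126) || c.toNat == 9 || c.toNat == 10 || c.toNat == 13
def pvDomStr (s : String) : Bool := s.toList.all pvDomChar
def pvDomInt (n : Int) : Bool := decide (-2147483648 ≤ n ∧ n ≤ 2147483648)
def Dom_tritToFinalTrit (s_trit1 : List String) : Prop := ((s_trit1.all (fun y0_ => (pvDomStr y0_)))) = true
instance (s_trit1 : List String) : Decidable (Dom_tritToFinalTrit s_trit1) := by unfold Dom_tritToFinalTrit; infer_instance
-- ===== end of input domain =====

-- B replaces A's count-up-to-a-multiple-of-25 loop by the closed form (5 - len) % 25 and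
-- builds the ternary header once via a digit list joined in reverse; no speed claim.

-- ===== PORT A =====

-- str(r) on the digit r, as a list of chars
def pvDigitStr (r : Nat) : List Char := PySem.Int.toChars (r : Int)

-- the 'while q != 0' loop of convert (convert is only ever called with base=3 and a
-- nonnegative argument, so it is ported specialised to base 3 over Nat; Nat / and %
-- coincide with Python // and % on nonnegative operands)
def convLoopA (q : Nat) (res : List Char) : List Char :=
  if h : q = 0 then res
  else convLoopA (q / 3) (pvDigitStr (q % 3) ++ res)
termination_by q
decreasing_by exact Nat.div_lt_self (Nat.pos_of_ne_zero h) (by omega)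

-- convert(n, base=3)
def convertA (n : Nat) : List Char := convLoopA (n / 3) (pvDigitStr (n % 3))

-- the 'while (len_trit_1_2 + s_trit3) % 25 != 0: s_trit3 += 1' loop; a multiple of 25 is
-- always reached within 25 steps, so fuel 25 makes the same computation total
def padLoopA (len12 : Nat) (k : Nat) (fuel : Nat) : Nat :=
  match fuel with
  | 0 => k
  | f + 1 => if (len12 + k) % 25 ≠ 0 then padLoopA len12 (k + 1) f else k

def tritToFinalTrit (s_trit1 : List String) : String × String × String × String :=
  let s := PySem.Chars.join [] (s_trit1.map String.toList)
  let lenTrit := convertA s.length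
  let nb0 : Int := 20 - (convertA s.length).length   -- nb0*"0" with nb0 < 0 is "" (toNat clamps, as Python does)
  let s_trit2 := List.replicate nb0.toNat '0' ++ lenTrit
  let len12 := s.length + 20
  let k := padLoopA len12 0 25
  let s_trit3 := List.replicate k '0'
  let s_trit4 := s ++ s_trit3 ++ s_trit2
  (String.ofList s_trit4, String.ofList lenTrit, String.ofList (List.replicate nb0.toNat '0'), String.ofList s_trit3)

-- ===== PORT B =====

-- the do-while digit-collecting loop of Source B (append str(n % 3), n //= 3, stop at 0)
def digitsLoopB (n : Nat) (acc : List (List Char)) : List (List Char) :=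
  let acc' := acc ++ [pvDigitStr (n % 3)]
  if h : n / 3 = 0 then acc' else digitsLoopB (n / 3) acc'
termination_by n
decreasing_by exact Nat.div_lt_self (Nat.pos_of_ne_zero (fun e => h (by simp [e]))) (by omega)

def tritToFinalTrit_alt (s_trit1 : List String) : String × String × String × String :=
  let s := PySem.Chars.join [] (s_trit1.map String.toList)
  let digits := digitsLoopB s.length []
  let lenTrit := digits.reverse.flatten              -- "".join(reversed(digits))
  let zeros := List.replicate (20 - digits.length) '0'  -- Nat sub clamps at 0, as "0"*negative does
  let pad := List.replicate (PySem.Int.mod (5 - (s.length : Int)) 25).toNat '0'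
  (String.ofList (s ++ pad ++ zeros ++ lenTrit), String.ofList lenTrit, String.ofList zeros, String.ofList pad)

-- ===== PRECONDITION & SPEC =====
def Spec_tritToFinalTrit (s_trit1 : List String) (out : String × String × String × String) : Prop := out = tritToFinalTrit_alt s_trit1
instance (s_trit1 : List String) (out : String × String × String × String) : Decidable (Spec_tritToFinalTrit s_trit1 out) := by unfold Spec_tritToFinalTrit; infer_instance

-- ===== CLAIM (what is proved, stated in full; the proofs are below) =====
def Claim_equal_tritToFinalTrit : Prop := ∀ (s_trit1 : List String), Dom_tritToFinalTrit s_trit1 → Spec_tritToFinalTrit s_trit1 (tritToFinalTrit s_trit1)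

-- ===== LEMMAS AND PROOFS =====

lemma pvDigitStr_len (n : Nat) : (pvDigitStr (n % 3)).length = 1 := by
  have h : n % 3 = 0 ∨ n % 3 = 1 ∨ n % 3 = 2 := by omega
  rcases h with h | h | h <;> rw [h] <;> decide

lemma convLoopA_append (q : Nat) (res : List Char) :
    convLoopA q res = convLoopA q [] ++ res := by
  induction q using Nat.strong_induction_on generalizing res with
  | _ q ih =>
    conv_lhs => rw [convLoopA]
    conv_rhs => rw [convLoopA]
    by_cases h : q = 0
    · simp [h]
    · have hlt : q / 3 < q := Nat.div_lt_self (Nat.pos_of_ne_zero h) (by omega)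
      simp only [h, dite_false]
      rw [ih _ hlt, ih _ hlt (pvDigitStr (q % 3) ++ [])]
      simp

lemma convLoopA_nil_eq (q : Nat) (h : q ≠ 0) : convLoopA q [] = convertA q := by
  rw [convertA]
  conv_lhs => rw [convLoopA]
  simp [h]

lemma digitsLoopB_flatten (n : Nat) (acc : List (List Char)) :
    (digitsLoopB n acc).reverse.flatten = convertA n ++ acc.reverse.flatten := by
  induction n using Nat.strong_induction_on generalizing acc with
  | _ n ih =>
    rw [digitsLoopB, convertA]
    by_cases h : n / 3 = 0
    · simp [h, convLoopA]
    · have hlt : n / 3 < n :=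
        Nat.div_lt_self (Nat.pos_of_ne_zero (fun e => h (by simp [e]))) (by omega)
      simp only [h, dite_false]
      rw [ih _ hlt, convLoopA_append, convLoopA_nil_eq _ h]
      simp

lemma flatten_len_of_all1 (L : List (List Char)) (h : ∀ l ∈ L, l.length = 1) :
    L.flatten.length = L.length := by
  induction L with
  | nil => simp
  | cons a as ih =>
    simp only [List.flatten_cons, List.length_append, List.length_cons]
    rw [h a (by simp), ih (fun l hl => h l (by simp [hl]))]
    omega

lemma digitsLoopB_all1 (n : Nat) (acc : List (List Char)) (hacc : ∀ l ∈ acc, l.length = 1) :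
    ∀ l ∈ digitsLoopB n acc, l.length = 1 := by
  induction n using Nat.strong_induction_on generalizing acc with
  | _ n ih =>
    rw [digitsLoopB]
    have hacc' : ∀ l ∈ acc ++ [pvDigitStr (n % 3)], l.length = 1 := by
      intro l hl
      rcases List.mem_append.1 hl with h | h
      · exact hacc l h
      · simp only [List.mem_singleton] at h; rw [h]; exact pvDigitStr_len n
    by_cases h : n / 3 = 0
    · simpa [h] using hacc'
    · have hlt : n / 3 < n :=
        Nat.div_lt_self (Nat.pos_of_ne_zero (fun e => h (by simp [e]))) (by omega)
      simp only [h, dite_false]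
      exact ih _ hlt _ hacc'

lemma digitsLoopB_len (n : Nat) (acc : List (List Char)) (hacc : ∀ l ∈ acc, l.length = 1) :
    (digitsLoopB n acc).reverse.flatten.length = (digitsLoopB n acc).length := by
  rw [flatten_len_of_all1 _ (fun l hl => digitsLoopB_all1 n acc hacc l (List.mem_reverse.1 hl))]
  simp

lemma padLoopA_eq (L : Nat) :
    ∀ fuel k, k ≤ (25 - L % 25) % 25 → (25 - L % 25) % 25 ≤ k + fuel →
      padLoopA L k fuel = (25 - L % 25) % 25 := by
  intro fuel
  induction fuel with
  | zero => intro k h1 h2; simp only [padLoopA]; omega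
  | succ f ih =>
    intro k h1 h2
    rw [padLoopA]
    by_cases h : (L + k) % 25 = 0
    · simp only [h, ne_eq, not_true_eq_false, if_false]
      omega
    · simp only [ne_eq, h, not_false_eq_true, if_true]
      apply ih <;> omega

-- ===== VERDICT (by name: the statement is the Claim_ definition above) =====
theorem tritToFinalTrit_spec : Claim_equal_tritToFinalTrit := by
  intro s_trit1 _
  unfold Spec_tritToFinalTrit tritToFinalTrit tritToFinalTrit_alt
  simp only
  set s := PySem.Chars.join [] (s_trit1.map String.toList) with hs
  have hlt : convertA s.length = (digitsLoopB s.length []).reverse.flatten := by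
    rw [digitsLoopB_flatten]; simp
  have hlen : (convertA s.length).length = (digitsLoopB s.length []).length := by
    rw [hlt, digitsLoopB_len _ _ (by simp)]
  have hnb : ((20 : Int) - (convertA s.length).length).toNat
      = 20 - (digitsLoopB s.length []).length := by
    rw [hlen]; omega
  have hpad : padLoopA (s.length + 20) 0 25
      = (PySem.Int.mod (5 - (s.length : Int)) 25).toNat := by
    rw [padLoopA_eq (s.length + 20) 25 0 (by omega) (by omega)]
    rw [PySem.Int.mod_eq_emod_of_pos (by omega)]
    omega
  rw [hnb, hlt, hpad]
  simp only [List.append_assoc]
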